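-- pv_equiv track=rewrite | github.com/joyboy129/agriculture | utils.py | get_next_code
-- ===== SOURCE A (Python) =====
-- from string import ascii_uppercase
-- from itertools import pairwise
--
-- def get_next_code(code):
--     '''
--     returns next column letter given existing one
--     input: 'AA', output: 'AB'
--     input: 'AB', output: 'AC'
--     '''
--     letter_map = {a: b for a, b in pairwise(ascii_uppercase)}
--     code = list(code)
--     i = -1
--     while True:
--         if code[i] == 'Z':
--             code[i] = 'A'
--             i -= 1
--             if abs(i) > len(code):
--                 return 'A' + ''.join(code)
--         else:
--             code[i] = letter_map[code[i]]
--             return ''.join(code)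
-- ===== SOURCE B (Python) =====
-- from string import ascii_uppercase
--
-- def get_next_code(code):
--     # base-26 bijective numeral: encode to an integer, add 1, decode back
--     idx = {c: i + 1 for i, c in enumerate(ascii_uppercase)}
--     n = 0
--     for c in code:
--         n = n * 26 + idx[c]
--     n += 1
--     out = []
--     while n:
--         n, r = divmod(n - 1, 26)
--         out.append(chr(65 + r))
--     return ''.join(reversed(out))
-- ===== Notes on version B (the rewrite author's own statement) =====
-- stated objective: alternative
-- what changed: Replaces the in-place right-to-left carry loop by a bijective base-26 numeric encode (+1) / decode; Pre_ restricts to nonempty all-uppercase strings (the column-code domain): elsewhere A raises, or returns an accidental value because it never inspects characters left of the incremented suffix.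
-- outside the precondition, e.g. on get_next_code('Z A c A'): A returns 'Z A c B', B raises KeyError; on get_next_code('?A'): A returns '?B', B raises KeyError
import Mathlib
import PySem

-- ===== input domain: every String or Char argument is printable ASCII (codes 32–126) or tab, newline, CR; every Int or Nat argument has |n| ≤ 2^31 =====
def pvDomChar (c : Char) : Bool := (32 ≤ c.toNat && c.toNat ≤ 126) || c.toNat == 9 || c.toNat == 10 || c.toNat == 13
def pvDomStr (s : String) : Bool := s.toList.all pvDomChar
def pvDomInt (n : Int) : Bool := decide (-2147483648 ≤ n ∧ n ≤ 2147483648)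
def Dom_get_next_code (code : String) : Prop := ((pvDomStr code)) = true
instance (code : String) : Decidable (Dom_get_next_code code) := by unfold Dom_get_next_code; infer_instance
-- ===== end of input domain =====

-- B replaces A's in-place right-to-left carry loop by a bijective base-26 numeric
-- encode (+1) / decode; same cost, different algorithm (objective: alternative).

-- ===== PORT A =====
def pvAUpper : List Char := "ABCDEFGHIJKLMNOPQRSTUVWXYZ".toList

-- letter_map = {a: b for a, b in pairwise(ascii_uppercase)}
def pvALetterMap : PySem.Dict Char Char := PySem.Dict.ofList (pvAUpper.zip pvAUpper.tail)

-- A's while-loop; Python's negative index i is represented by the equivalent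
-- non-negative position k = len(code) + i (abs(i) > len(code) ↔ k would pass 0).
-- On the raising paths (IndexError on "" handled in get_next_code, KeyError for a
-- non-A..Z char) the port returns "" (outside Pre_).
def pvALoop (m : PySem.Dict Char Char) (cs : List Char) (k : Nat) : String :=
  match cs[k]? with
  | none => ""
  | some c =>
    if c = 'Z' then
      let cs' := cs.set k 'A'
      match k with
      | 0 => String.mk ('A' :: cs')            -- abs(i) > len(code): return 'A' + ''.join(code)
      | Nat.succ k' => pvALoop m cs' k'        -- i -= 1
    else
      match PySem.Dict.get? m c with
      | none => ""                             -- KeyError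
      | some b => String.mk (cs.set k b)

def get_next_code (code : String) : String :=
  if code.toList.length = 0 then ""            -- code[-1] on [] : IndexError (outside Pre_)
  else pvALoop pvALetterMap code.toList (code.toList.length - 1)

-- ===== PORT B =====
def pvBUpper : List Char := "ABCDEFGHIJKLMNOPQRSTUVWXYZ".toList

-- idx = {c: i + 1 for i, c in enumerate(ascii_uppercase)}
def pvBIdx : PySem.Dict Char Int :=
  PySem.Dict.ofList ((PySem.List.enumerate pvBUpper).map (fun p => (p.2, p.1 + 1)))

-- n = 0; for c in code: n = n * 26 + idx[c]   (none = KeyError, outside Pre_)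
def pvBEncode (cs : List Char) : Option Int :=
  cs.foldl (fun acc c => acc.bind (fun n => (PySem.Dict.get? pvBIdx c).map (fun v => n * 26 + v)))
    (some 0)

-- while n: n, r = divmod(n - 1, 26); out.append(chr(65 + r));  return ''.join(reversed(out))
-- (the append-then-reverse of Source B is rendered as prepending to the accumulator)
def pvBDecode (n : Int) (acc : List Char) : List Char :=
  if 0 < n then
    pvBDecode (PySem.Int.floordiv (n - 1) 26)
      (Char.ofNat (65 + PySem.Int.mod (n - 1) 26).toNat :: acc)
  else acc
termination_by n.toNat
decreasing_by
  rename_i h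
  rw [PySem.Int.floordiv_eq_ediv_of_pos (by norm_num)]
  omega

def get_next_code_alt (code : String) : String :=
  match pvBEncode code.toList with
  | none => ""
  | some n => String.mk (pvBDecode (n + 1) [])

-- ===== PRECONDITION & SPEC =====
-- Pre_ restricts to nonempty all-uppercase strings (the column-code domain): elsewhere
-- A raises (IndexError on "", KeyError on a non-A..Z char it inspects), or returns an
-- accidental value because it never inspects characters left of the incremented suffix.
def Pre_get_next_code (code : String) : Prop :=
  code ≠ "" ∧ code.toList.all (fun c => decide (65 ≤ c.toNat ∧ c.toNat ≤ 90)) = true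
instance (code : String) : Decidable (Pre_get_next_code code) := by
  unfold Pre_get_next_code; infer_instance

def pvWitness_get_next_code : String := "AZ"

def Spec_get_next_code (code : String) (out : String) : Prop := out = get_next_code_alt code
instance (code : String) (out : String) : Decidable (Spec_get_next_code code out) := by
  unfold Spec_get_next_code; infer_instance

-- ===== CLAIM (what is proved, stated in full; the proofs are below) =====
def Claim_equal_get_next_code : Prop := ∀ (code : String), Dom_get_next_code code → Pre_get_next_code code → Spec_get_next_code code (get_next_code code)


-- ===== LEMMAS AND PROOFS =====

-- the bijective base-26 value of an uppercase string, as a Nat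
def pvVal (cs : List Char) : Nat := cs.foldl (fun n c => n * 26 + (c.toNat - 64)) 0

theorem pvBIdx_range : ∀ n < 26, PySem.Dict.get? pvBIdx (Char.ofNat (65 + n)) = some ((n : Int) + 1) := by decide

theorem pvBIdx_get (c : Char) (h1 : 65 ≤ c.toNat) (h2 : c.toNat ≤ 90) :
    PySem.Dict.get? pvBIdx c = some ((c.toNat : Int) - 64) := by
  have hc : Char.ofNat (65 + (c.toNat - 65)) = c := by
    rw [show 65 + (c.toNat - 65) = c.toNat by omega, Char.ofNat_toNat]
  have := pvBIdx_range (c.toNat - 65) (by omega)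
  rw [hc] at this
  rw [this]
  congr 1
  omega

theorem pvALetterMap_range : ∀ n < 25, PySem.Dict.get? pvALetterMap (Char.ofNat (65 + n)) = some (Char.ofNat (66 + n)) := by decide

theorem pvALetterMap_get (c : Char) (h1 : 65 ≤ c.toNat) (h2 : c.toNat ≤ 89) :
    PySem.Dict.get? pvALetterMap c = some (Char.ofNat (c.toNat + 1)) := by
  have hc : Char.ofNat (65 + (c.toNat - 65)) = c := by
    rw [show 65 + (c.toNat - 65) = c.toNat by omega, Char.ofNat_toNat]
  have := pvALetterMap_range (c.toNat - 65) (by omega)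
  rw [hc] at this
  rw [this]
  congr 2
  omega

theorem pvALoop_Z0 (m : PySem.Dict Char Char) (cs : List Char) (h : cs[0]? = some 'Z') :
    pvALoop m cs 0 = String.mk ('A' :: cs.set 0 'A') := by
  rw [pvALoop, h]
  simp

theorem pvALoop_ZS (m : PySem.Dict Char Char) (cs : List Char) (k' : Nat)
    (h : cs[k' + 1]? = some 'Z') :
    pvALoop m cs (k' + 1) = pvALoop m (cs.set (k' + 1) 'A') k' := by
  rw [pvALoop, h]
  simp

theorem pvALoop_ne (m : PySem.Dict Char Char) (cs : List Char) (k : Nat) (c : Char)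
    (h : cs[k]? = some c) (hz : ¬ c = 'Z') :
    pvALoop m cs k =
      match PySem.Dict.get? m c with
      | none => ""
      | some b => String.mk (cs.set k b) := by
  rw [pvALoop, h]
  simp [hz]

-- one decode step on a value v*26 + b with 1 ≤ b ≤ 26
theorem pvBDecode_step (v b : Nat) (hb1 : 1 ≤ b) (hb2 : b ≤ 26) (acc : List Char) :
    pvBDecode ((v * 26 + b : Nat) : Int) acc = pvBDecode (v : Int) (Char.ofNat (64 + b) :: acc) := by
  rw [pvBDecode]
  have hpos : (0 : Int) < ((v * 26 + b : Nat) : Int) := by push_cast; omega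
  rw [if_pos hpos]
  have hfd : PySem.Int.floordiv (((v * 26 + b : Nat) : Int) - 1) 26 = (v : Int) := by
    rw [PySem.Int.floordiv_eq_ediv_of_pos (by norm_num)]; push_cast; omega
  have hmd : PySem.Int.mod (((v * 26 + b : Nat) : Int) - 1) 26 = ((b : Int) - 1) := by
    rw [PySem.Int.mod_eq_emod_of_pos (by norm_num)]; push_cast; omega
  rw [hfd, hmd, show ((65 : Int) + ((b : Int) - 1)).toNat = 64 + b from by omega]

theorem pvBDecode_zero (acc : List Char) : pvBDecode 0 acc = acc := by
  rw [pvBDecode]; norm_num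

theorem pvVal_append (zs : List Char) (c : Char) :
    pvVal (zs ++ [c]) = pvVal zs * 26 + (c.toNat - 64) := by
  simp [pvVal, List.foldl_append]

-- decoding the value of an uppercase string gives the string back
theorem pvBDecode_val (cs : List Char) (h : ∀ c ∈ cs, 65 ≤ c.toNat ∧ c.toNat ≤ 90) (acc : List Char) :
    pvBDecode ((pvVal cs : Nat) : Int) acc = cs ++ acc := by
  induction cs using List.reverseRecOn generalizing acc with
  | nil => simpa [pvVal] using pvBDecode_zero acc
  | append_singleton zs c ih =>
    have hc := h c (by simp)
    have hzs : ∀ x ∈ zs, 65 ≤ x.toNat ∧ x.toNat ≤ 90 := fun x hx => h x (by simp [hx])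
    rw [pvVal_append, pvBDecode_step (pvVal zs) (c.toNat - 64) (by omega) (by omega),
      show 64 + (c.toNat - 64) = c.toNat by omega, Char.ofNat_toNat, ih hzs]
    simp

-- the encode fold computes the base-26 value
theorem pvBEncode_fold (cs : List Char) (h : ∀ c ∈ cs, 65 ≤ c.toNat ∧ c.toNat ≤ 90) :
    ∀ v : Nat,
      cs.foldl (fun acc c => acc.bind (fun n => (PySem.Dict.get? pvBIdx c).map (fun w => n * 26 + w)))
        (some (v : Int))
      = some ((cs.foldl (fun n c => n * 26 + (c.toNat - 64)) v : Nat) : Int) := by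
  induction cs with
  | nil => intro v; simp
  | cons c cs ih =>
    intro v
    have hc := h c (by simp)
    have hcs : ∀ x ∈ cs, 65 ≤ x.toNat ∧ x.toNat ≤ 90 := fun x hx => h x (by simp [hx])
    simp only [List.foldl_cons, Option.bind_some, pvBIdx_get c hc.1 hc.2, Option.map_some]
    rw [show (v : Int) * 26 + ((c.toNat : Int) - 64) = ((v * 26 + (c.toNat - 64) : Nat) : Int) by
      push_cast; omega]
    exact ih hcs _

theorem pvBEncode_val (cs : List Char) (h : ∀ c ∈ cs, 65 ≤ c.toNat ∧ c.toNat ≤ 90) :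
    pvBEncode cs = some ((pvVal cs : Nat) : Int) :=
  pvBEncode_fold cs h 0

-- A's loop computes decode(val + 1), with the untouched tail as accumulator
theorem pvALoop_eq (ys : List Char) (hne : ys ≠ [])
    (h : ∀ c ∈ ys, 65 ≤ c.toNat ∧ c.toNat ≤ 90) :
    ∀ suffix, pvALoop pvALetterMap (ys ++ suffix) (ys.length - 1)
      = String.mk (pvBDecode ((pvVal ys + 1 : Nat) : Int) suffix) := by
  induction ys using List.reverseRecOn with
  | nil => exact absurd rfl hne
  | append_singleton zs c ih =>
    intro suffix
    have hc := h c (by simp)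
    have hzs : ∀ x ∈ zs, 65 ≤ x.toNat ∧ x.toNat ≤ 90 := fun x hx => h x (by simp [hx])
    have hk : (zs ++ [c]).length - 1 = zs.length := by simp
    have hget : (zs ++ [c] ++ suffix)[zs.length]? = some c := by
      rw [List.append_assoc]
      rw [List.getElem?_append_right (le_refl _)]
      simp
    have hset : ∀ x : Char, (zs ++ [c] ++ suffix).set zs.length x = zs ++ [x] ++ suffix := by
      intro x
      rw [List.append_assoc, List.set_append_right _ _ (le_refl _)]
      simp
    rw [hk]
    by_cases hz : c = 'Z'
    · -- carry: set to 'A', move left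
      subst hz
      have hval : pvVal (zs ++ ['Z']) + 1 = (pvVal zs + 1) * 26 + 1 := by
        have h90 : 'Z'.toNat = 90 := rfl
        rw [pvVal_append]; omega
      have hA : Char.ofNat (64 + 1) = 'A' := by decide
      rw [hval, pvBDecode_step (pvVal zs + 1) 1 (by omega) (by omega), hA]
      cases zs with
      | nil =>
        simp only [List.nil_append, List.singleton_append, List.length_nil] at hget ⊢
        rw [pvALoop_Z0 _ _ hget]
        rw [show pvVal ([] : List Char) + 1 = 0 * 26 + 1 by simp [pvVal],
          pvBDecode_step 0 1 (by omega) (by omega), hA,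
          show ((0 : Nat) : Int) = 0 from by norm_num, pvBDecode_zero]
        simp
      | cons z zs' =>
        simp only [List.length_cons] at hget ⊢
        rw [pvALoop_ZS _ _ _ hget]
        have hs : (z :: zs' ++ ['Z'] ++ suffix).set (zs'.length + 1) 'A'
            = z :: (zs' ++ ['A'] ++ suffix) := by
          simp
        rw [hs]
        have := ih (by simp) (fun x hx => hzs x hx) ('A' :: suffix)
        simpa using this
    · -- no carry: bump the last letter
      have hlt : c.toNat ≤ 89 := by
        by_contra hgt
        have h90 : c.toNat = 90 := by omega
        exact hz (by rw [← Char.ofNat_toNat c, h90])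
      rw [pvALoop_ne _ _ _ _ hget hz, pvALetterMap_get c hc.1 hlt]
      show String.mk ((zs ++ [c] ++ suffix).set zs.length (Char.ofNat (c.toNat + 1)))
        = String.mk (pvBDecode ((pvVal (zs ++ [c]) + 1 : Nat) : Int) suffix)
      rw [hset]
      have hval : pvVal (zs ++ [c]) + 1 = pvVal zs * 26 + (c.toNat - 64 + 1) := by
        rw [pvVal_append]; omega
      rw [hval, pvBDecode_step (pvVal zs) (c.toNat - 64 + 1) (by omega) (by omega),
        show 64 + (c.toNat - 64 + 1) = c.toNat + 1 by omega, pvBDecode_val zs hzs]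
      simp

-- ===== VERDICT (by name: the statement is the Claim_ definition above) =====
theorem get_next_code_spec : Claim_equal_get_next_code := by
  intro code _hdom hpre
  obtain ⟨hne0, hb⟩ := hpre
  have hbound : ∀ c ∈ code.toList, 65 ≤ c.toNat ∧ c.toNat ≤ 90 := by
    intro c hc
    exact of_decide_eq_true (List.all_eq_true.mp hb c hc)
  have hne : code.toList ≠ [] := fun h => hne0 (by
    have := congrArg String.ofList h
    simpa using this)
  unfold Spec_get_next_code get_next_code get_next_code_alt
  rw [pvBEncode_val code.toList hbound, if_neg (by simpa using hne)]
  show pvALoop pvALetterMap code.toList (code.toList.length - 1)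
      = String.mk (pvBDecode ((pvVal code.toList : Int) + 1) [])
  have := pvALoop_eq code.toList hne hbound []
  rw [List.append_nil] at this
  rw [this]
  norm_num
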